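-- pv_equiv track=rewrite | github.com/ginesam/ccg2lambda | scripts/abduction_tools.py | GetPremiseLines
-- ===== SOURCE A (Python) =====
-- def FindFinalConclusionSepLineIndex(coq_output_lines):
--   indices = [i for i, line in enumerate(coq_output_lines)\
--                if line.startswith('===') and line.endswith('===')]
--   if not indices:
--     return None
--   return indices[-1]
--
-- def GetPremiseLines(coq_output_lines):
--   premise_lines = []
--   line_index_last_conclusion_sep = FindFinalConclusionSepLineIndex(coq_output_lines)
--   if not line_index_last_conclusion_sep:
--     return premise_lines
--   for line in coq_output_lines[line_index_last_conclusion_sep-1:0:-1]: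
--     if line == "":
--       return premise_lines
--     else:
--       premise_lines.append(line)
--   return premise_lines
-- ===== SOURCE B (Python) =====
-- def GetPremiseLines(coq_output_lines):
--     sep = None
--     for i in range(len(coq_output_lines) - 1, -1, -1):
--         line = coq_output_lines[i]
--         if line.startswith('===') and line.endswith('==='):
--             sep = i
--             break
--     if not sep:
--         return []
--     block = coq_output_lines[1:sep]
--     try:
--         cut = len(block) - block[::-1].index('')
--     except ValueError:
--         cut = 0
--     return block[cut:][::-1]
-- ===== Notes on version B (the rewrite author's own statement) =====
-- stated objective: alternative
-- what changed: B finds the last separator by a single backward scan with early break (instead of materialising all separator indices via a comprehension), then computes the premise block by locating the last blank line and slicing/reversing, instead of A's fused backward append-until-blank loop.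
import Mathlib
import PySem

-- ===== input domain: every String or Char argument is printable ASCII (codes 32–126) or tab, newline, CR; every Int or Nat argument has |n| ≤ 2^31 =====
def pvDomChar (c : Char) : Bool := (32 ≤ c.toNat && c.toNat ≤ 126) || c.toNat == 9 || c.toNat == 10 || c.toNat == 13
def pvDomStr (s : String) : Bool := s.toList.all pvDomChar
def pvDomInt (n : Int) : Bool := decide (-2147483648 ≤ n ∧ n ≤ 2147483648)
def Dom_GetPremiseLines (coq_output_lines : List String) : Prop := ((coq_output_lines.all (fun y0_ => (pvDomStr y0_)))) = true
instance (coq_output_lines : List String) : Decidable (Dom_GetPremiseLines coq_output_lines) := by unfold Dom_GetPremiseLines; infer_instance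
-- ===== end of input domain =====

-- B replaces A's collect-all-indices comprehension by a backward scan with early break, and
-- A's fused backward append-until-blank loop by boundary-index computation plus slicing; same cost.

-- ===== PORT A =====
def FindFinalConclusionSepLineIndex (coq_output_lines : List String) : Option Int :=
  let indices := ((PySem.List.enumerate coq_output_lines).filter
      (fun p => PySem.Str.startswith p.2 "===" && PySem.Str.endswith p.2 "===")).map (fun p => p.1)
  if indices = [] then none
  else PySem.List.pyGet? indices (-1)   -- indices[-1]; the list is nonempty here, so this is some _

-- A's backward for-loop with its early return on a blank line
def pvLoopA : List String → List String → List String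
  | [], premise_lines => premise_lines
  | line :: rest, premise_lines =>
      if line = "" then premise_lines
      else pvLoopA rest (premise_lines ++ [line])

def GetPremiseLines (coq_output_lines : List String) : List String :=
  let premise_lines : List String := []
  match FindFinalConclusionSepLineIndex coq_output_lines with
  | none => premise_lines
  | some i =>
      if i = 0 then premise_lines   -- `if not i` is also taken when the index is 0
      else pvLoopA ((PySem.List.slice? coq_output_lines (some (i - 1)) (some 0) (-1)).getD []) premise_lines

-- ===== PORT B =====
-- B's backward scan: first index (from the end) whose line is a '===…===' separator
def pvLastSepScanB (coq_output_lines : List String) : List Int → Option Int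
  | [] => none
  | i :: rest =>
      match PySem.List.pyGet? coq_output_lines i with
      | some line =>
          if PySem.Str.startswith line "===" && PySem.Str.endswith line "===" then some i
          else pvLastSepScanB coq_output_lines rest
      | none => pvLastSepScanB coq_output_lines rest   -- unreachable: pyRange indices are in range

def GetPremiseLines_alt (coq_output_lines : List String) : List String :=
  match pvLastSepScanB coq_output_lines
      (PySem.List.pyRange ((coq_output_lines.length : Int) - 1) (-1) (-1)) with
  | none => []
  | some s =>
      if s = 0 then []
      else
        let block := PySem.List.slice coq_output_lines (some 1) (some s)
        let cut : Int :=
          match PySem.List.index? block.reverse "" with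
          | some j => (block.length : Int) - (j : Int)
          | none => 0
        (PySem.List.slice block (some cut) none).reverse

-- ===== PRECONDITION & SPEC =====
def Spec_GetPremiseLines (coq_output_lines : List String) (out : List String) : Prop := out = GetPremiseLines_alt coq_output_lines
instance (coq_output_lines : List String) (out : List String) : Decidable (Spec_GetPremiseLines coq_output_lines out) := by unfold Spec_GetPremiseLines; infer_instance

-- ===== CLAIM (what is proved, stated in full; the proofs are below) =====
def Claim_equal_GetPremiseLines : Prop := ∀ (coq_output_lines : List String), Dom_GetPremiseLines coq_output_lines → Spec_GetPremiseLines coq_output_lines (GetPremiseLines coq_output_lines)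

-- ===== LEMMAS AND PROOFS =====

-- A's loop appends lines until the first blank: it is the prefix before the first "".
theorem pvLoopA_eq (r acc : List String) :
    pvLoopA r acc = acc ++ (match r.idxOf? "" with | some j => r.take j | none => r) := by
  induction r generalizing acc with
  | nil => simp [pvLoopA, List.idxOf?]
  | cons l t ih =>
      by_cases h : l = ""
      · subst h; simp [pvLoopA, List.idxOf?, List.findIdx?_cons]
      · simp only [pvLoopA, if_neg h, ih, List.idxOf?, List.findIdx?_cons]
        have hb : (l == "") = false := by simpa using h
        simp only [hb]
        cases ht : List.findIdx? (· == "") t with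
        | none => simp
        | some j => simp [List.take_succ_cons]

-- the negative-step slice coq_output_lines[m-1:0:-1] is the reverse of coq_output_lines[1:m]
theorem pvSliceRev (xs : List String) (m : Nat) (h1 : 1 ≤ m) (h2 : m < xs.length) :
    PySem.List.slice? xs (some ((m:Int)-1)) (some 0) (-1) = some (((xs.drop 1).take (m - 1)).reverse) := by
  simp only [PySem.List.slice?, PySem.List.sliceIndices]
  norm_num
  rw [if_neg (by omega), min_eq_left (by omega : (m:Int) - 1 ≤ (xs.length:Int) - 1),
      min_eq_left (by omega : (0:Int) ≤ (xs.length:Int) - 1)]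
  by_cases hm : m = 1
  · subst hm; norm_num
  rw [if_pos (Or.inl (by omega))]
  have hc : ((m:Int) - 1 - 0).toNat = m - 1 := by omega
  rw [hc]
  rw [List.filterMap_congr (g := fun x => some (xs.getD (m - 1 - x) ""))]
  · rw [show (fun x => some (xs.getD (m - 1 - x) "")) = some ∘ (fun x => xs.getD (m - 1 - x) "") from rfl,
       List.filterMap_eq_map]
    apply List.ext_getElem
    · simp; omega
    · intro k hk1 hk2
      simp only [List.getElem_map, List.getElem_range, List.getElem_reverse]
      rw [List.getD_eq_getElem _ _ (by simp at hk1 ⊢; omega)]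
      simp only [List.getElem_take, List.getElem_tail]
      simp only [List.length_reverse, List.length_take, List.length_tail, List.length_map,
        List.length_range] at hk1 hk2 ⊢
      congr 1
      omega
  · intro x hx
    simp only [List.mem_range] at hx
    have hx2 : ((m:Int) - 1 + -(x:Int)).toNat = m - 1 - x := by omega
    rw [hx2, List.getElem?_eq_getElem (by omega), List.getD_eq_getElem _ _ (by omega)]

-- B's backward scan over range(n-1,-1,-1) computes the LAST separator index among the first n lines
theorem pvScanTake (xs : List String) : ∀ n : Nat, n ≤ xs.length →
    pvLastSepScanB xs (PySem.List.pyRange ((n:Int) - 1) (-1) (-1)) =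
    (((PySem.List.enumerate (xs.take n)).filter
        (fun p => PySem.Str.startswith p.2 "===" && PySem.Str.endswith p.2 "===")).map (fun p => p.1)).getLast? := by
  intro n
  induction n with
  | zero =>
      intro _
      rw [PySem.List.pyRange_neg_one_eq_nil (by omega)]
      simp [pvLastSepScanB, PySem.List.enumerate_nil]
  | succ n ih =>
      intro h
      have hn : n < xs.length := by omega
      rw [show ((n+1 : Nat) : Int) - 1 = (n : Int) from by push_cast; ring,
          PySem.List.pyRange_neg_one_cons (by omega)]
      have hget : PySem.List.pyGet? xs ((n : Int)) = some xs[n] := by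
        rw [PySem.List.pyGet?_natCast, List.getElem?_eq_getElem hn]
      have htake : xs.take (n+1) = xs.take n ++ [xs[n]] := by
        rw [List.take_add_one, List.getElem?_eq_getElem hn]; rfl
      have hlen : (xs.take n).length = n := by simp [List.length_take]; omega
      rw [htake, PySem.List.enumerate_append, hlen, PySem.List.enumerate_cons,
        PySem.List.enumerate_nil, List.filter_append, List.map_append]
      cases hsep : (PySem.Str.startswith xs[n] "===" && PySem.Str.endswith xs[n] "===") with
      | true =>
          simp only [pvLastSepScanB, hget, hsep, if_true]
          rw [List.filter_cons_of_pos (by simpa using hsep), List.filter_nil, List.map_cons,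
            List.map_nil, List.getLast?_concat]
          simp
      | false =>
          simp only [pvLastSepScanB, hget, hsep, Bool.false_eq_true, if_false]
          rw [List.filter_cons_of_neg (by simpa using hsep), List.filter_nil, List.map_nil,
            List.append_nil]
          exact ih (by omega)

-- A's helper equals getLast? of the separator-index list
theorem pvFindEq (xs : List String) :
    FindFinalConclusionSepLineIndex xs =
    (((PySem.List.enumerate xs).filter
        (fun p => PySem.Str.startswith p.2 "===" && PySem.Str.endswith p.2 "===")).map (fun p => p.1)).getLast? := by
  unfold FindFinalConclusionSepLineIndex
  set ind := ((PySem.List.enumerate xs).filter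
      (fun p => PySem.Str.startswith p.2 "===" && PySem.Str.endswith p.2 "===")).map (fun p => p.1) with hind
  by_cases h : ind = []
  · simp [h]
  · rw [if_neg h, PySem.List.pyGet?_neg_one]

-- a member of the index list is a valid index
theorem pvIdxBounds (xs : List String) (i : Int)
    (h : i ∈ ((PySem.List.enumerate xs).filter
        (fun p => PySem.Str.startswith p.2 "===" && PySem.Str.endswith p.2 "===")).map (fun p => p.1)) :
    0 ≤ i ∧ i < xs.length := by
  simp only [List.mem_map] at h
  obtain ⟨p, hp, rfl⟩ := h
  have hp2 := List.mem_of_mem_filter hp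
  rw [PySem.List.mem_enumerate_iff] at hp2
  obtain ⟨k, hk, rfl⟩ := hp2
  simp; omega

theorem GetPremiseLines_spec_aux (xs : List String) :
    GetPremiseLines xs = GetPremiseLines_alt xs := by
  unfold GetPremiseLines GetPremiseLines_alt
  rw [pvFindEq]
  rw [pvScanTake xs xs.length le_rfl]
  rw [List.take_length]
  set ind := ((PySem.List.enumerate xs).filter
      (fun p => PySem.Str.startswith p.2 "===" && PySem.Str.endswith p.2 "===")).map (fun p => p.1) with hind
  cases hlast : ind.getLast? with
  | none => rfl
  | some i =>
      have hmem : i ∈ ind := List.mem_of_getLast? hlast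
      obtain ⟨h0, hlt⟩ := pvIdxBounds xs i hmem
      by_cases hi : i = 0
      · simp [hi]
      · simp only [if_neg hi]
        have hm1 : 1 ≤ i.toNat := by omega
        have hm2 : i.toNat < xs.length := by omega
        have hicast : ((i.toNat : Nat) : Int) = i := by omega
        have hslice := pvSliceRev xs i.toNat hm1 hm2
        rw [hicast] at hslice
        rw [hslice]
        have hblock : PySem.List.slice xs (some 1) (some i) = (xs.drop 1).take (i.toNat - 1) := by
          rw [PySem.List.slice_toNat xs (by omega) (by omega)]
          norm_num
        rw [hblock]
        set block := (xs.drop 1).take (i.toNat - 1) with hb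
        simp only [Option.getD_some]
        rw [pvLoopA_eq, List.nil_append]
        rw [PySem.List.index?_eq_idxOf?]
        cases hidx : block.reverse.idxOf? "" with
        | none =>
            simp only []
            rw [PySem.List.slice_from block (by norm_num)]
            simp
        | some j =>
            simp only []
            have hjlt : j < block.reverse.length := by
              have h' := hidx
              simp only [List.idxOf?] at h'
              exact (List.findIdx?_eq_some_iff_findIdx_eq.mp h').1
            simp only [List.length_reverse] at hjlt
            have hcut : (0 : Int) ≤ (block.length : Int) - (j : Int) := by omega
            rw [PySem.List.slice_from block hcut]
            have htn : ((block.length : Int) - (j : Int)).toNat = block.length - j := by omega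
            rw [htn]
            rw [List.reverse_drop]
            congr 1
            omega

-- ===== VERDICT (by name: the statement is the Claim_ definition above) =====
theorem GetPremiseLines_spec : Claim_equal_GetPremiseLines := by
  intro xs _
  exact GetPremiseLines_spec_aux xs
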